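-- pv_equiv track=rewrite | github.com/sanrach0178/Data-Allocator | app.py | calculate_unrestricted_demand
-- ===== SOURCE A (Python) =====
-- CONTENT_COSTS = {"Text": 5, "Quiz": 15, "Audio": 40, "Video": 150}
--
-- def calculate_unrestricted_demand(students):
--     demand_mb = 0
--     for s in students:
--         if s["goal"] == "Basic Literacy":
--             q = ["Text", "Text", "Quiz", "Text", "Audio", "Text", "Quiz", "Text", "Quiz", "Text", "Text"]
--         elif s["goal"] == "Concept Building":
--             q = ["Text", "Audio", "Text", "Quiz", "Video", "Text", "Audio", "Quiz", "Text", "Audio"]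
--         else:
--             q = ["Quiz", "Video", "Text", "Quiz", "Audio", "Quiz", "Video", "Text", "Quiz", "Video", "Quiz"]
--         demand_mb += sum([CONTENT_COSTS[item] for item in q])
--     return demand_mb
-- ===== SOURCE B (Python) =====
-- # Count-then-closed-form: per-goal demand totals are fixed constants (120/320/575),
-- # so count students per category and combine, instead of rebuilding and summing a
-- # content list per student.
-- def calculate_unrestricted_demand(students):
--     goals = [s["goal"] for s in students]
--     nb = goals.count("Basic Literacy")
--     nc = goals.count("Concept Building")
--     return 120 * nb + 320 * nc + 575 * (len(goals) - nb - nc)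
-- ===== Notes on version B (the rewrite author's own statement) =====
-- stated objective: simpler
-- what changed: Replaces per-student rebuilding and summing of a content list with one pass collecting goals, counting the two named categories, and a closed-form 120*nb + 320*nc + 575*rest.
import Mathlib
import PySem

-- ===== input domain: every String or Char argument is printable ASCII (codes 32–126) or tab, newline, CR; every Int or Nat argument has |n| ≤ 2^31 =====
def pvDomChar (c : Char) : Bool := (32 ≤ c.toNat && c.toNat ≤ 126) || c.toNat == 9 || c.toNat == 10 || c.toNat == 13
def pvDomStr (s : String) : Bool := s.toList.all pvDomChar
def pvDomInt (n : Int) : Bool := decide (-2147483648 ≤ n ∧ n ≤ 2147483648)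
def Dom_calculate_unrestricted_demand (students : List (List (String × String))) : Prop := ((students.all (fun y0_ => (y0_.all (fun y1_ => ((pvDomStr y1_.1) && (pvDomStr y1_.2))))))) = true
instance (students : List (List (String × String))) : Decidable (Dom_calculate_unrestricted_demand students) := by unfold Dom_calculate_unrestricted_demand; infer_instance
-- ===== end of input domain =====

-- B replaces per-student list-summing with category counts and a closed form; same return value on Pre_.
-- ===== PORT A =====
def CONTENT_COSTS : PySem.Dict String Int :=
  PySem.Dict.ofList [("Text", 5), ("Quiz", 15), ("Audio", 40), ("Video", 150)]

-- s["goal"]; Pre_ guarantees the key is present (Python raises KeyError otherwise)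
def pvGoal (s : List (String × String)) : String :=
  ((PySem.Dict.mk s).get? "goal").getD ""

def calculate_unrestricted_demand (students : List (List (String × String))) : Int :=
  students.foldl (fun demand_mb s =>
    let q : List String :=
      if pvGoal s = "Basic Literacy" then
        ["Text", "Text", "Quiz", "Text", "Audio", "Text", "Quiz", "Text", "Quiz", "Text", "Text"]
      else if pvGoal s = "Concept Building" then
        ["Text", "Audio", "Text", "Quiz", "Video", "Text", "Audio", "Quiz", "Text", "Audio"]
      else
        ["Quiz", "Video", "Text", "Quiz", "Audio", "Quiz", "Video", "Text", "Quiz", "Video", "Quiz"]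
    demand_mb + (q.map (fun item => (CONTENT_COSTS.get? item).getD 0)).sum) 0

-- ===== PORT B =====
def calculate_unrestricted_demand_alt (students : List (List (String × String))) : Int :=
  let goals := students.map pvGoal
  let nb : Int := PySem.List.count goals "Basic Literacy"
  let nc : Int := PySem.List.count goals "Concept Building"
  120 * nb + 320 * nc + 575 * ((goals.length : Int) - nb - nc)

-- ===== PRECONDITION & SPEC =====
-- Pre_ excludes students lacking a "goal" key, on which Python A raises KeyError.
def Pre_calculate_unrestricted_demand (students : List (List (String × String))) : Prop :=
  ∀ s ∈ students, (PySem.Dict.mk s).contains "goal" = true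
instance (students : List (List (String × String))) : Decidable (Pre_calculate_unrestricted_demand students) := by
  unfold Pre_calculate_unrestricted_demand; infer_instance
def pvWitness_calculate_unrestricted_demand : (List (List (String × String))) :=
  [[("goal", "Basic Literacy")], [("goal", "Chess")]]

def Spec_calculate_unrestricted_demand (students : List (List (String × String))) (out : Int) : Prop := out = calculate_unrestricted_demand_alt students
instance (students : List (List (String × String))) (out : Int) : Decidable (Spec_calculate_unrestricted_demand students out) := by unfold Spec_calculate_unrestricted_demand; infer_instance

-- ===== CLAIM (what is proved, stated in full; the proofs are below) =====
def Claim_equal_calculate_unrestricted_demand : Prop := ∀ (students : List (List (String × String))), Dom_calculate_unrestricted_demand students → Pre_calculate_unrestricted_demand students → Spec_calculate_unrestricted_demand students (calculate_unrestricted_demand students)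

-- ===== LEMMAS AND PROOFS =====

-- per-student contribution of A's loop body
def pvContrib (s : List (String × String)) : Int :=
  if pvGoal s = "Basic Literacy" then 120
  else if pvGoal s = "Concept Building" then 320
  else 575

theorem foldl_shift (l : List (List (String × String))) (f : List (String × String) → Int) (a : Int) :
    l.foldl (fun acc s => acc + f s) a = a + l.foldl (fun acc s => acc + f s) 0 := by
  induction l generalizing a with
  | nil => simp
  | cons x xs ih => simp only [List.foldl]; rw [ih, ih (0 + f x)]; ring

theorem A_eq_sum (students : List (List (String × String))) :
    calculate_unrestricted_demand students = students.foldl (fun acc s => acc + pvContrib s) 0 := by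
  unfold calculate_unrestricted_demand
  congr 1
  funext acc s
  by_cases h1 : pvGoal s = "Basic Literacy" <;> by_cases h2 : pvGoal s = "Concept Building" <;>
    simp [h1, h2, pvContrib, CONTENT_COSTS] <;> decide

theorem AB_eq (students : List (List (String × String))) :
    calculate_unrestricted_demand students = calculate_unrestricted_demand_alt students := by
  rw [A_eq_sum]
  induction students with
  | nil => decide
  | cons s rest ih =>
    simp only [List.foldl]
    rw [foldl_shift, ih]
    unfold calculate_unrestricted_demand_alt pvContrib
    simp only [List.map_cons, PySem.List.count, List.count_cons, List.length_cons]
    by_cases h1 : pvGoal s = "Basic Literacy" <;> by_cases h2 : pvGoal s = "Concept Building" <;>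
      simp [h1, h2, List.count] <;> ring

-- ===== VERDICT (by name: the statement is the Claim_ definition above) =====
theorem calculate_unrestricted_demand_spec : Claim_equal_calculate_unrestricted_demand := by
  intro students _ _
  unfold Spec_calculate_unrestricted_demand
  exact AB_eq students
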